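-- pv_equiv track=rewrite | github.com/farzadhallaji/myTakenTpoNeos | record_neo.py | calculate_reading
-- ===== SOURCE A (Python) =====
-- def calculate_reading(right_answer, user_answer):
--     map_score = {
--         1: {0:1, 1:0},
--         2: {0:1, 1:0, 2:0},
--         3: {0:2, 1:1, 2:0, 3:0},
--         5: {0:3, 1:2, 2:1, 3:0, 4:0, 5:0}
--     }
--     rcount = len(right_answer)
--     wcount = 0
--     if len(user_answer) < rcount:
--         return map_score[rcount][rcount], map_score[rcount][0]
--
--     for ra_char, ua_char in zip(right_answer, user_answer):
--         if ra_char != ua_char: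
--             wcount += 1
--     return map_score[rcount][wcount], map_score[rcount][0]
-- ===== SOURCE B (Python) =====
-- def calculate_reading(right_answer, user_answer):
--     # base score from a flat dict (KeyError preserved for lengths outside {1,2,3,5});
--     # then spend the score down, one point per mismatch, recursing and stopping
--     # early once the score hits zero -- no mismatch count and no score table.
--     base = {1: 1, 2: 1, 3: 2, 5: 3}[len(right_answer)]
--     if len(user_answer) < len(right_answer):
--         return 0, base
--
--     def spend(rs, us, score):
--         if not rs or score == 0:
--             return score
--         return spend(rs[1:], us[1:], score - (rs[0] != us[0]))
--
--     return spend(right_answer, user_answer, base), base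
-- ===== Notes on version B (the rewrite author's own statement) =====
-- stated objective: alternative
-- what changed: Replaces A's count-mismatches-then-index-a-two-level-table pass with a recursive 'spend' walk that decrements the base score (from a flat dict, preserving the KeyError for lengths outside {1,2,3,5}) one point per mismatch and stops early once it reaches zero; no mismatch counter and no score table.
import Mathlib
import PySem

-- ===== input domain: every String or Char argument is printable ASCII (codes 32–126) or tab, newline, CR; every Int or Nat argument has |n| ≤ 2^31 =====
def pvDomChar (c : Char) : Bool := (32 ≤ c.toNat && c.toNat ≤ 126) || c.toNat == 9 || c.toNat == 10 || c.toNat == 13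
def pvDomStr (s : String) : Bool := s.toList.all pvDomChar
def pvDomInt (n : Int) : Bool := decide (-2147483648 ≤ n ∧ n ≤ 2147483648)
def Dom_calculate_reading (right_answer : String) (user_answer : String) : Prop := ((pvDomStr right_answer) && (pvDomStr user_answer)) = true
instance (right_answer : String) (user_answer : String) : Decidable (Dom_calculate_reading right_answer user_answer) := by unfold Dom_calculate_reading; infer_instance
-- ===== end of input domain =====

-- B replaces A's count-mismatches-then-index-a-two-level-table pass with a flat base dict
-- and a recursive score-spending walk that stops early at zero; objective: alternative.

-- ===== PORT A =====
def calculate_reading (right_answer : String) (user_answer : String) : Int × Int :=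
  let map_score : PySem.Dict Int (PySem.Dict Int Int) :=
    PySem.Dict.ofList
      [ (1, PySem.Dict.ofList [(0, 1), (1, 0)]),
        (2, PySem.Dict.ofList [(0, 1), (1, 0), (2, 0)]),
        (3, PySem.Dict.ofList [(0, 2), (1, 1), (2, 0), (3, 0)]),
        (5, PySem.Dict.ofList [(0, 3), (1, 2), (2, 1), (3, 0), (4, 0), (5, 0)]) ]
  let rcount : Int := right_answer.toList.length
  -- map_score[rcount][k]: KeyError (get? = none) is excluded by Pre_; default 0 is unreachable there
  let look : Int → Int := fun k => (((map_score.get? rcount).getD PySem.Dict.empty).get? k).getD 0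
  if (user_answer.toList.length : Int) < rcount then
    (look rcount, look 0)
  else
    let wcount : Int := (right_answer.toList.zip user_answer.toList).foldl
      (fun w p => if p.1 != p.2 then w + 1 else w) 0
    (look wcount, look 0)

-- ===== PORT B =====
-- spend(rs, us, score): rs[1:]/us[1:] for a nonnegative index is List.drop 1 (exact);
-- us[0] via pyGet? with a default that is unreachable under Pre_ (len us ≥ len rs at every call)
def pvSpend (rs us : List Char) (score : Int) : Int :=
  match rs with
  | [] => score
  | r :: rt =>
    if score = 0 then score
    else pvSpend rt (us.drop 1)
      (score - (if r != (PySem.List.pyGet? us 0).getD ' ' then 1 else 0))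

def calculate_reading_alt (right_answer : String) (user_answer : String) : Int × Int :=
  -- {1:1, 2:1, 3:2, 5:3}[len(right_answer)]; KeyError excluded by Pre_, default 0 unreachable there
  let base : Int :=
    ((PySem.Dict.ofList [((1 : Int), (1 : Int)), (2, 1), (3, 2), (5, 3)]).get?
      (right_answer.toList.length : Int)).getD 0
  if (user_answer.toList.length : Int) < (right_answer.toList.length : Int) then
    (0, base)
  else
    (pvSpend right_answer.toList user_answer.toList base, base)

-- ===== PRECONDITION & SPEC =====
-- Pre_ excludes exactly the inputs where Python A raises KeyError: len(right_answer) ∉ {1,2,3,5}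
def Pre_calculate_reading (right_answer : String) (user_answer : String) : Prop :=
  right_answer.toList.length = 1 ∨ right_answer.toList.length = 2 ∨
  right_answer.toList.length = 3 ∨ right_answer.toList.length = 5
instance (right_answer : String) (user_answer : String) : Decidable (Pre_calculate_reading right_answer user_answer) := by unfold Pre_calculate_reading; infer_instance
def pvWitness_calculate_reading : String × String := ("abc", "axc")

def Spec_calculate_reading (right_answer : String) (user_answer : String) (out : Int × Int) : Prop := out = calculate_reading_alt right_answer user_answer
instance (right_answer : String) (user_answer : String) (out : Int × Int) : Decidable (Spec_calculate_reading right_answer user_answer out) := by unfold Spec_calculate_reading; infer_instance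

-- ===== CLAIM (what is proved, stated in full; the proofs are below) =====
def Claim_equal_calculate_reading : Prop := ∀ (right_answer : String) (user_answer : String), Dom_calculate_reading right_answer user_answer → Pre_calculate_reading right_answer user_answer → Spec_calculate_reading right_answer user_answer (calculate_reading right_answer user_answer)

-- ===== LEMMAS AND PROOFS =====

-- A's mismatch-counting loop equals countP over the zip
theorem pv_foldl_count (l : List (Char × Char)) (c : Int) :
    l.foldl (fun w p => if p.1 != p.2 then w + 1 else w) c
      = c + l.countP (fun p => p.1 != p.2) := by
  induction l generalizing c with
  | nil => simp
  | cons a t ih =>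
      simp only [List.foldl_cons, List.countP_cons, ih]
      by_cases h : a.1 != a.2 <;> simp [h] <;> omega

theorem pv_countP_le (r u : List Char) :
    (r.zip u).countP (fun p => p.1 != p.2) ≤ r.length := by
  calc (r.zip u).countP (fun p => p.1 != p.2) ≤ (r.zip u).length := List.countP_le_length
    _ ≤ r.length := by simp [List.length_zip]

-- B's spending walk computes max 0 (score - mismatches) when us covers rs
theorem pv_spend_eq (rs : List Char) : ∀ (us : List Char) (s : Int), 0 ≤ s →
    rs.length ≤ us.length →
    pvSpend rs us s = max 0 (s - (rs.zip us).countP (fun p => p.1 != p.2)) := by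
  induction rs with
  | nil => intro us s h0 _; simp [pvSpend]; omega
  | cons r rt ih =>
      intro us s h0 hl
      cases us with
      | nil => simp at hl
      | cons c ut =>
          simp only [pvSpend, List.zip_cons_cons, List.countP_cons]
          by_cases hs : s = 0
          · subst hs
            have : (0:Int) ≤ (rt.zip ut).countP (fun p => p.1 != p.2) := by positivity
            by_cases h : (r != c) = true <;> simp [h] <;> omega
          · rw [if_neg hs]
            have hget : (PySem.List.pyGet? (c :: ut) 0).getD ' ' = c := by
              simp [PySem.List.pyGet?, PySem.List.pyIdx?]
            rw [hget]
            simp only [List.drop_succ_cons, List.drop_zero]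
            by_cases h : (r != c) = true
            · rw [if_pos h, if_pos h, ih ut (s - 1) (by omega) (by simpa using hl)]
              push_cast; omega
            · rw [if_neg h, if_neg h, sub_zero, Nat.add_zero,
                ih ut s h0 (by simpa using hl)]

-- ===== VERDICT (by name: the statement is the Claim_ definition above) =====
theorem calculate_reading_spec : Claim_equal_calculate_reading := by
  intro r u _ hpre
  unfold Spec_calculate_reading
  simp only [calculate_reading, calculate_reading_alt, pv_foldl_count, zero_add]
  by_cases hlt : (u.toList.length : Int) < (r.toList.length : Int)
  · rw [if_pos hlt, if_pos hlt]
    rcases hpre with h | h | h | h <;> rw [h] <;> decide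
  · rw [if_neg hlt, if_neg hlt]
    have hle : r.toList.length ≤ u.toList.length := by exact_mod_cast not_lt.mp hlt
    rw [pv_spend_eq _ _ _ (by rcases hpre with h | h | h | h <;> rw [h] <;> decide) hle]
    set k := (r.toList.zip u.toList).countP (fun p => p.1 != p.2) with hk
    have hkle : k ≤ r.toList.length := hk ▸ pv_countP_le _ _
    clear_value k
    rcases hpre with h | h | h | h <;> rw [h] at hkle ⊢ <;>
      (interval_cases k <;> decide)
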